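-- pv_equiv track=rewrite | github.com/GeorgiBal/Python_Beginner_Projects | Python_Number_Systems/Task3/Extra_Code.py | extra_code
-- ===== SOURCE A (Python) =====
-- def extra_code(dec):
--     dec = bin(dec)
--
--     dec = dec[2:]
--     reverse_binary = dec[0]
--
--     for i in range(1, len(dec)):
--         if dec[i] == "1":
--             reverse_binary += "0"
--         elif dec[i] == "0":
--             reverse_binary += "1"
--
--     total = 1
--     reverse_binary = reverse_binary[::-1]
--     for i in range(len(reverse_binary)):
--         total += pow(2, i) * int(reverse_binary[i])
--     total = bin(total)
--     return total[2:]
-- ===== SOURCE B (Python) =====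
-- def extra_code(dec):
--     # Closed form: keeping the top bit of an m-bit number v and complementing the
--     # lower m-1 bits gives 2^(m-1) + (2^(m-1)-1 - (v - 2^(m-1))) = 3*2^(m-1) - 1 - v;
--     # adding 1 yields 3*2^(m-1) - v; the zero input is handled separately.
--     if dec == 0:
--         return "1"
--     return bin(3 * (1 << (dec.bit_length() - 1)) - dec)[2:]
-- ===== Notes on version B (the rewrite author's own statement) =====
-- stated objective: alternative
-- what changed: B replaces the whole string pipeline (flip each binary digit, reverse, rebuild with sum(2**i*int(bit)), +1) with a closed-form arithmetic identity: for positive dec with bit length m the result is bin(3*2^(m-1) - dec), with the zero input handled separately; no per-character work at all.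
import Mathlib
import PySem

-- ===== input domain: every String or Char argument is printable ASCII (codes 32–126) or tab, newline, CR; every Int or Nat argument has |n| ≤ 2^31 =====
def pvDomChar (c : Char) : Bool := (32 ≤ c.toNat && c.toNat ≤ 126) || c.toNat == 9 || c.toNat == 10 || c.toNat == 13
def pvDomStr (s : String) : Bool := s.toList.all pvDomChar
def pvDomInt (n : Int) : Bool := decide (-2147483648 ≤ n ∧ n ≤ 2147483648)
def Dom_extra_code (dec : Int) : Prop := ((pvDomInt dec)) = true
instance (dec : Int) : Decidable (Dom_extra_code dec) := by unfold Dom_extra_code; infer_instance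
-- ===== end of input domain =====

-- B replaces A's flip/reverse/positional-sum string pipeline by the closed-form
-- arithmetic identity: for positive dec with bit length m the answer is bin(3*2^(m-1) - dec),
-- with the zero input handled separately (objective: alternative algorithm, no per-character work).


-- ===== PORT A =====
-- bin(n)[2:] for a nonnegative n, as a list of '0'/'1' characters
def binDigits (n : Nat) : List Char :=
  if h : n = 0 then [] else binDigits (n / 2) ++ [if n % 2 = 1 then '1' else '0']
termination_by n
decreasing_by exact Nat.div_lt_self (Nat.pos_of_ne_zero h) (by norm_num)

def binList (n : Nat) : List Char := if n = 0 then ['0'] else binDigits n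

-- A's first loop: for i in range(1, len(dec)): append '0' for '1', '1' for '0', nothing otherwise
def flipLoop : List Char → List Char
  | [] => []
  | c :: cs =>
      (if c = '1' then ['0'] else if c = '0' then ['1'] else []) ++ flipLoop cs

-- A's second loop: total += pow(2, i) * int(reverse_binary[i]) over increasing index i
def sumLoop : List Char → Nat → Nat
  | [], _ => 0
  | c :: cs, i => 2 ^ i * (if c = '1' then 1 else 0) + sumLoop cs (i + 1)

def extra_code (dec : Int) : String :=
  let s := binList dec.toNat
  match s with
  | [] => ""  -- unreachable: binList is never empty
  | c :: rest =>
      let reverse_binary := c :: flipLoop rest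
      let total := 1 + sumLoop reverse_binary.reverse 0
      String.mk (binList total)

-- ===== PORT B =====
-- int.bit_length(), hand-ported step for step (exact for nonnegative arguments;
-- B applies it to dec only after the dec == 0 test, via |dec| which agrees on Pre_)
def bitLength (n : Nat) : Nat :=
  if h : n = 0 then 0 else bitLength (n / 2) + 1
termination_by n
decreasing_by exact Nat.div_lt_self (Nat.pos_of_ne_zero h) (by norm_num)

def extra_code_alt (dec : Int) : String :=
  if dec = 0 then "1"
  else
    let m := bitLength dec.natAbs
    String.mk (binList (3 * 2 ^ (m - 1) - dec).toNat)

-- ===== PRECONDITION & SPEC =====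
-- A raises ValueError on every negative dec (int() is applied to the 'b' of '-0b…'); Pre_ excludes exactly those.
def Pre_extra_code (dec : Int) : Prop := 0 ≤ dec
instance (dec : Int) : Decidable (Pre_extra_code dec) := by unfold Pre_extra_code; infer_instance
def pvWitness_extra_code : Int := (6)

def Spec_extra_code (dec : Int) (out : String) : Prop := out = extra_code_alt dec
instance (dec : Int) (out : String) : Decidable (Spec_extra_code dec out) := by unfold Spec_extra_code; infer_instance

-- ===== CLAIM (what is proved, stated in full; the proofs are below) =====
def Claim_equal_extra_code : Prop := ∀ (dec : Int), Dom_extra_code dec → Pre_extra_code dec → Spec_extra_code dec (extra_code dec)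

-- ===== LEMMAS AND PROOFS =====
-- int(comp, 2)-style left-to-right binary value of a digit list (proof-side only)
def parseBin (l : List Char) : Nat :=
  l.foldl (fun acc c => acc * 2 + (if c = '1' then 1 else 0)) 0

-- every character binDigits produces is '0' or '1'
theorem binDigits_chars : ∀ (n : Nat), ∀ c ∈ binDigits n, c = '0' ∨ c = '1' := by
  intro n
  induction n using Nat.strong_induction_on with
  | _ n ih =>
    rw [binDigits]
    split
    · simp
    · intro c hc
      rcases List.mem_append.1 hc with h | h
      · exact ih (n / 2) (Nat.div_lt_self (Nat.pos_of_ne_zero (by assumption)) (by norm_num)) c h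
      · simp only [List.mem_singleton] at h
        subst h; split <;> simp

-- on binary characters, A's flip loop is digit-wise complement
theorem flipLoop_eq_map (l : List Char) (h : ∀ c ∈ l, c = '0' ∨ c = '1') :
    flipLoop l = l.map (fun ch => if ch = '1' then '0' else '1') := by
  induction l with
  | nil => rfl
  | cons c cs ih =>
    have hc := h c (List.mem_cons_self)
    have hl := ih (fun x hx => h x (List.mem_cons_of_mem _ hx))
    rcases hc with hc | hc <;> subst hc <;> simp [flipLoop, hl]

theorem sumLoop_append (xs ys : List Char) :
    ∀ i, sumLoop (xs ++ ys) i = sumLoop xs i + sumLoop ys (i + xs.length) := by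
  induction xs with
  | nil => intro i; simp [sumLoop]
  | cons c cs ih =>
    intro i
    simp only [List.cons_append, sumLoop, ih, List.length_cons]
    ring_nf

theorem parseBin_acc (l : List Char) :
    ∀ a, l.foldl (fun acc c => acc * 2 + (if c = '1' then 1 else 0)) a
      = a * 2 ^ l.length + parseBin l := by
  induction l with
  | nil => intro a; simp [parseBin]
  | cons c cs ih =>
    intro a
    simp only [List.foldl_cons, List.length_cons, parseBin] at *
    rw [ih (a * 2 + (if c = '1' then 1 else 0)), ih (0 * 2 + (if c = '1' then 1 else 0))]
    generalize (if c = '1' then (1:Nat) else 0) = b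
    ring

theorem parseBin_cons (c : Char) (cs : List Char) :
    parseBin (c :: cs) = (if c = '1' then 1 else 0) * 2 ^ cs.length + parseBin cs := by
  simp only [parseBin, List.foldl_cons]
  rw [show ((0:Nat) * 2 + (if c = '1' then 1 else 0)) = (if c = '1' then 1 else 0) by ring]
  exact parseBin_acc cs _

-- A's reversed positional sum equals the left-to-right parse
theorem sumLoop_reverse (l : List Char) : sumLoop l.reverse 0 = parseBin l := by
  induction l with
  | nil => rfl
  | cons c cs ih =>
    rw [List.reverse_cons, sumLoop_append, ih, parseBin_cons]
    simp only [sumLoop, List.length_reverse]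
    split_ifs <;> ring

-- value and digit-wise complement value always add up to 2^length - 1
theorem parseBin_flip (l : List Char) :
    parseBin l + parseBin (l.map (fun ch => if ch = '1' then '0' else '1')) + 1
      = 2 ^ l.length := by
  induction l with
  | nil => rfl
  | cons c cs ih =>
    simp only [List.map_cons, List.length_cons]
    rw [parseBin_cons, parseBin_cons ((if c = '1' then '0' else '1')) ]
    have hb : (if c = '1' then (1:Nat) else 0)
        + (if (if c = '1' then '0' else '1') = '1' then (1:Nat) else 0) = 1 := by
      by_cases h : c = '1' <;> simp [h]
    simp only [List.length_map]
    have : 2 ^ (cs.length + 1) = 2 ^ cs.length + 2 ^ cs.length := by ring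
    rw [this, ← ih]
    nlinarith [hb]

theorem parseBin_binDigits : ∀ (n : Nat), parseBin (binDigits n) = n := by
  intro n
  induction n using Nat.strong_induction_on with
  | _ n ih =>
    rw [binDigits]
    split
    · simp [parseBin]; omega
    · rename_i h
      rw [show parseBin (binDigits (n/2) ++ [if n % 2 = 1 then '1' else '0'])
            = parseBin (binDigits (n/2)) * 2 + (if n % 2 = 1 then 1 else 0) by
          simp [parseBin, List.foldl_append]]
      rw [ih (n / 2) (Nat.div_lt_self (Nat.pos_of_ne_zero h) (by norm_num))]
      split_ifs <;> omega

theorem length_binDigits : ∀ (n : Nat), (binDigits n).length = bitLength n := by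
  intro n
  induction n using Nat.strong_induction_on with
  | _ n ih =>
    rw [binDigits, bitLength]
    split
    · simp
    · rename_i h
      simp [ih (n / 2) (Nat.div_lt_self (Nat.pos_of_ne_zero h) (by norm_num))]

theorem binDigits_head : ∀ (n : Nat), n ≠ 0 → ∃ r, binDigits n = '1' :: r := by
  intro n
  induction n using Nat.strong_induction_on with
  | _ n ih =>
    intro h
    rw [binDigits, dif_neg h]
    by_cases h2 : n / 2 = 0
    · refine ⟨[], ?_⟩
      rw [binDigits, dif_pos h2]
      have : n % 2 = 1 := by omega
      simp [this]
    · obtain ⟨r, hr⟩ := ih (n / 2) (Nat.div_lt_self (Nat.pos_of_ne_zero h) (by norm_num)) h2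
      exact ⟨r ++ [if n % 2 = 1 then '1' else '0'], by rw [hr]; rfl⟩

-- ===== VERDICT (by name: the statement is the Claim_ definition above) =====
theorem extra_code_spec : Claim_equal_extra_code := by
  intro dec _ hpre
  have hd : (0:Int) ≤ dec := hpre
  unfold Spec_extra_code
  by_cases h0 : dec = 0
  · subst h0
    have h01 : binDigits 0 = [] := by rw [binDigits]; simp
    have h11 : binDigits 1 = ['1'] := by rw [binDigits]; norm_num [h01]
    unfold extra_code extra_code_alt
    norm_num [binList, flipLoop, sumLoop]
    rw [show (1 + if ('0':Char) = '1' then 1 else 0) = 1 from by decide, h11]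
    rfl
  · have hn : dec.toNat ≠ 0 := by omega
    obtain ⟨rest, hr⟩ := binDigits_head dec.toNat hn
    unfold extra_code extra_code_alt
    rw [if_neg h0]
    have hbl : binList dec.toNat = '1' :: rest := by rw [binList, if_neg hn, hr]
    rw [hbl]
    simp only []
    have hchars : ∀ x ∈ rest, x = '0' ∨ x = '1' := by
      intro x hx
      exact binDigits_chars dec.toNat x (by rw [hr]; exact List.mem_cons_of_mem _ hx)
    rw [sumLoop_reverse, flipLoop_eq_map rest hchars, parseBin_cons]
    -- arithmetic: 1 + (2^|rest| + F) = 3*2^(m-1) - dec, given P + F + 1 = 2^|rest|,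
    -- 2^|rest| + P = dec.toNat, m = |rest| + 1
    have hsum := parseBin_flip rest
    have hval : parseBin (binDigits dec.toNat) = dec.toNat := parseBin_binDigits dec.toNat
    rw [hr, parseBin_cons] at hval
    have hlen : bitLength dec.natAbs = rest.length + 1 := by
      have : dec.natAbs = dec.toNat := by omega
      rw [this, ← length_binDigits, hr, List.length_cons]
    rw [hlen]
    simp only [reduceIte, one_mul] at hval
    simp only [reduceIte, one_mul, List.length_map, Nat.add_sub_cancel]
    have hcast : ((2:Int) ^ rest.length) = ((2 ^ rest.length : Nat) : Int) := by
      push_cast; ring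
    rw [hcast]
    have hnat : 1 + (2 ^ rest.length
          + parseBin (rest.map (fun ch => if ch = '1' then '0' else '1')))
        = ((3 * ((2 ^ rest.length : Nat) : Int) - dec).toNat) := by omega
    rw [hnat]
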